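-- pv_equiv track=rewrite | github.com/galcohensius/kinneret-algae-atlas | src/algae_extractor/reader.py | _normalize_text_and_styles
-- ===== SOURCE A (Python) =====
-- def _normalize_text_and_styles(chars: list[tuple[str, int]]) -> tuple[str, list[int]]:
--     """
--     Normalize whitespace like `normalize_whitespace`, but also return per-character
--     style flags aligned to the normalized text.
--
--     Style flags are bit-packed:
--       - bit 1: italic
--       - bit 2: bold
--       - bit 0: neutral
--     """
--     out_chars: list[str] = []
--     out_styles: list[int] = []
--     prev_was_space = False
--
--     for ch, style in chars:
--         is_space = ch.isspace()
--         if is_space: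
--             if not prev_was_space and out_chars:
--                 out_chars.append(" ")
--                 out_styles.append(0)  # neutral style for whitespace
--             prev_was_space = True
--             continue
--
--         out_chars.append(ch)
--         out_styles.append(style)
--         prev_was_space = False
--
--     # Trim trailing space to match `.strip()` semantics.
--     if out_chars and out_chars[-1] == " ":
--         out_chars.pop()
--         out_styles.pop()
--
--     return ("".join(out_chars), out_styles)
-- ===== SOURCE B (Python) =====
-- def _normalize_text_and_styles(chars: list[tuple[str, int]]) -> tuple[str, list[int]]:
--     """Whitespace-normalize via an explicit word list: collect maximal runs of
--     non-space (char, style) pairs as words, then interleave words with a single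
--     neutral (' ', 0) separator."""
--     words: list[list[tuple[str, int]]] = []
--     cur: list[tuple[str, int]] = []
--     for ch, style in chars:
--         if ch.isspace():
--             if cur:
--                 words.append(cur)
--                 cur = []
--         else:
--             cur.append((ch, style))
--     if cur:
--         words.append(cur)
--
--     out: list[tuple[str, int]] = []
--     for word in words:
--         if out:
--             out.append((" ", 0))
--         out.extend(word)
--     return ("".join(ch for ch, _ in out), [s for _, s in out])
-- ===== Notes on version B (the rewrite author's own statement) =====
-- stated objective: alternative
-- what changed: Replaces A's single stateful pass (prev_was_space flag, eager separator emission, final trailing-space trim) by a two-phase decomposition: first build an explicit list of words (maximal runs of non-space (char, style) pairs), then interleave the words with a single neutral separator, which makes leading/trailing-space-freedom structural and needs no trim.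
import Mathlib
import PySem

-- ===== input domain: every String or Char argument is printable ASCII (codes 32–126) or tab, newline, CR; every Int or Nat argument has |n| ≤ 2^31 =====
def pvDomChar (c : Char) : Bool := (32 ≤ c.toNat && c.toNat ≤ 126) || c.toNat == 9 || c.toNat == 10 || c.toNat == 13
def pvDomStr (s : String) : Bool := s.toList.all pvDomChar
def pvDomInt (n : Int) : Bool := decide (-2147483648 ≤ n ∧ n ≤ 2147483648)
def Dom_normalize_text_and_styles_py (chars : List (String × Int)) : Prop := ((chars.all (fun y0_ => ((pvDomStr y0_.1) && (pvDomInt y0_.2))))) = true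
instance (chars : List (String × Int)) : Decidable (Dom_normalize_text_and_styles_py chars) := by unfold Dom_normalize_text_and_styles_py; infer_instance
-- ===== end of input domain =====

-- B changes the decomposition: an explicit word list interleaved with one neutral separator,
-- instead of A's single stateful pass with a prev_was_space flag and a final trailing-space trim.

-- ===== PORT A =====
-- loop body of A: state ((out_chars, out_styles), prev_was_space)
def pvAStep (st : (List String × List Int) × Bool) (p : String × Int) : (List String × List Int) × Bool :=
  if PySem.Str.strIsspace p.1 then
    (if !st.2 && !st.1.1.isEmpty then ((st.1.1 ++ [" "], st.1.2 ++ [(0 : Int)]), true)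
     else (st.1, true))
  else ((st.1.1 ++ [p.1], st.1.2 ++ [p.2]), false)

def normalize_text_and_styles_py (chars : List (String × Int)) : String × List Int :=
  let st := chars.foldl pvAStep (([], []), false)
  -- "if out_chars and out_chars[-1] == ' ': pop both"
  if st.1.1.getLast? = some " " then
    (PySem.Str.join "" st.1.1.dropLast, st.1.2.dropLast)
  else
    (PySem.Str.join "" st.1.1, st.1.2)

-- ===== PORT B =====
-- loop body of B's first pass: state (words, cur)
def pvBStep (st : List (List (String × Int)) × List (String × Int)) (p : String × Int) :
    List (List (String × Int)) × List (String × Int) :=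
  if PySem.Str.strIsspace p.1 then
    (if st.2.isEmpty then st else (st.1 ++ [st.2], []))
  else
    (st.1, st.2 ++ [p])

-- B's second pass: interleave words with a single neutral (" ", 0) separator
def pvRend (ws : List (List (String × Int))) : List (String × Int) :=
  ws.foldl (fun acc w => (if acc.isEmpty then acc else acc ++ [((" " : String), (0 : Int))]) ++ w) []

def normalize_text_and_styles_py_alt (chars : List (String × Int)) : String × List Int :=
  let st := chars.foldl pvBStep ([], [])
  let ws := if st.2.isEmpty then st.1 else st.1 ++ [st.2]
  let out := pvRend ws
  (PySem.Str.join "" (out.map (·.1)), out.map (·.2))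

-- ===== PRECONDITION & SPEC =====
def Spec_normalize_text_and_styles_py (chars : List (String × Int)) (out : String × List Int) : Prop := out = normalize_text_and_styles_py_alt chars
instance (chars : List (String × Int)) (out : String × List Int) : Decidable (Spec_normalize_text_and_styles_py chars out) := by unfold Spec_normalize_text_and_styles_py; infer_instance

-- ===== CLAIM (what is proved, stated in full; the proofs are below) =====
def Claim_equal_normalize_text_and_styles_py : Prop := ∀ (chars : List (String × Int)), Dom_normalize_text_and_styles_py chars → Spec_normalize_text_and_styles_py chars (normalize_text_and_styles_py chars)

-- ===== LEMMAS AND PROOFS =====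

-- the pair list A's (out_chars, out_styles) holds, expressed from B's state (words, cur, prev_was_space)
def pvPairs (ws : List (List (String × Int))) (cur : List (String × Int)) (prev : Bool) :
    List (String × Int) :=
  if cur.isEmpty then
    (if prev then pvRend ws ++ (if ws.isEmpty then [] else [((" " : String), (0 : Int))])
     else pvRend ws)
  else pvRend (ws ++ [cur])

theorem pvRend_snoc (ws : List (List (String × Int))) (w : List (String × Int)) :
    pvRend (ws ++ [w]) =
      (if (pvRend ws).isEmpty then pvRend ws else pvRend ws ++ [((" " : String), (0 : Int))]) ++ w := by
  simp [pvRend, List.foldl_append]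

theorem pvRend_ne_nil (ws : List (List (String × Int)))
    (hw : ∀ w ∈ ws, w ≠ []) (h : ws ≠ []) : (pvRend ws).isEmpty = false := by
  rcases List.eq_nil_or_concat ws with rfl | ⟨ws', w, rfl⟩
  · exact absurd rfl h
  · rw [List.concat_eq_append, pvRend_snoc]
    have hw' : w ≠ [] := hw w (by simp)
    simp [List.isEmpty_eq_false_iff, hw']

-- main invariant: A's fold state is the pair-list image of B's fold state
theorem pvMain (chars : List (String × Int)) :
    ∀ ws cur prev,
    (∀ p ∈ cur, PySem.Str.strIsspace p.1 = false) →
    (∀ w ∈ ws, w ≠ []) →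
    (prev = true → cur = []) →
    (cur = [] → prev = false → ws = []) →
    ∃ prev',
      chars.foldl pvAStep (((pvPairs ws cur prev).map (·.1), (pvPairs ws cur prev).map (·.2)), prev)
        = (((pvPairs (chars.foldl pvBStep (ws, cur)).1 (chars.foldl pvBStep (ws, cur)).2 prev').map (·.1),
            (pvPairs (chars.foldl pvBStep (ws, cur)).1 (chars.foldl pvBStep (ws, cur)).2 prev').map (·.2)), prev')
      ∧ (∀ p ∈ (chars.foldl pvBStep (ws, cur)).2, PySem.Str.strIsspace p.1 = false)
      ∧ (∀ w ∈ (chars.foldl pvBStep (ws, cur)).1, w ≠ [])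
      ∧ (prev' = true → (chars.foldl pvBStep (ws, cur)).2 = [])
      ∧ ((chars.foldl pvBStep (ws, cur)).2 = [] → prev' = false → (chars.foldl pvBStep (ws, cur)).1 = []) := by
  induction chars with
  | nil => intro ws cur prev h1 h2 h3 h4; exact ⟨prev, rfl, h1, h2, h3, h4⟩
  | cons p rest ih =>
    intro ws cur prev h1 h2 h3 h4
    rw [List.foldl_cons, List.foldl_cons]
    by_cases hs : PySem.Chars.strIsspace p.1.toList = true
    · by_cases hc : cur.isEmpty
      · have hc' : cur = [] := List.isEmpty_iff.mp hc
        subst hc'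
        have hB : pvBStep (ws, []) p = (ws, []) := by simp [pvBStep, hs]
        rw [hB]
        cases prev with
        | false =>
          have hws : ws = [] := h4 rfl rfl
          subst hws
          have hA : pvAStep (((pvPairs [] [] false).map (·.1), (pvPairs [] [] false).map (·.2)), false) p
              = (((pvPairs [] [] true).map (·.1), (pvPairs [] [] true).map (·.2)), true) := by
            simp [pvAStep, pvPairs, pvRend, hs]
          rw [hA]
          exact ih [] [] true h1 h2 (fun _ => rfl) (fun _ h => absurd h (by simp))
        | true =>
          have hA : pvAStep (((pvPairs ws [] true).map (·.1), (pvPairs ws [] true).map (·.2)), true) p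
              = (((pvPairs ws [] true).map (·.1), (pvPairs ws [] true).map (·.2)), true) := by
            simp [pvAStep, hs]
          rw [hA]
          exact ih ws [] true h1 h2 (fun _ => rfl) (fun _ h => absurd h (by simp))
      · have hcur : cur ≠ [] := by simpa [List.isEmpty_iff] using hc
        have hprev : prev = false := by
          cases prev with
          | false => rfl
          | true => exact absurd (h3 rfl) hcur
        subst hprev
        have hB : pvBStep (ws, cur) p = (ws ++ [cur], []) := by simp [pvBStep, hs, hc]
        rw [hB]
        have hwcur : ∀ w ∈ ws ++ [cur], w ≠ [] := by
          intro w hw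
          rcases List.mem_append.mp hw with h | h
          · exact h2 w h
          · simp at h; subst h; exact hcur
        have hpairs : pvPairs ws cur false = pvRend (ws ++ [cur]) := by
          simp [pvPairs, hc]
        have hne : (pvRend (ws ++ [cur])).isEmpty = false :=
          pvRend_ne_nil _ hwcur (by simp)
        have hpairs' : pvPairs (ws ++ [cur]) [] true = pvRend (ws ++ [cur]) ++ [((" " : String), (0 : Int))] := by
          simp [pvPairs]
        have hA : pvAStep (((pvPairs ws cur false).map (·.1), (pvPairs ws cur false).map (·.2)), false) p
            = (((pvPairs (ws ++ [cur]) [] true).map (·.1), (pvPairs (ws ++ [cur]) [] true).map (·.2)), true) := by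
          rw [hpairs, hpairs']
          have hne' : ((pvRend (ws ++ [cur])).map (·.1 : String × Int → String)).isEmpty = false := by
            simp only [List.isEmpty_eq_false_iff] at hne ⊢
            simpa using hne
          simp [pvAStep, hs, hne']
        rw [hA]
        exact ih (ws ++ [cur]) [] true (by simp) hwcur (fun _ => rfl) (fun _ h => absurd h (by simp))
    · have hs' : PySem.Chars.strIsspace p.1.toList = false := by simpa using hs
      have hsStr : PySem.Str.strIsspace p.1 = false := by simpa using hs'
      have hB : pvBStep (ws, cur) p = (ws, cur ++ [p]) := by simp [pvBStep, hs']
      rw [hB]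
      have hkey : pvPairs ws (cur ++ [p]) false = pvPairs ws cur prev ++ [p] := by
        by_cases hc : cur.isEmpty
        · have hc' : cur = [] := List.isEmpty_iff.mp hc
          subst hc'
          cases prev with
          | false =>
            have hws : ws = [] := h4 rfl rfl
            subst hws
            simp [pvPairs, pvRend]
          | true =>
            rcases List.eq_nil_or_concat ws with rfl | ⟨ws', w, rfl⟩
            · simp [pvPairs, pvRend]
            · have hne : (pvRend (ws'.concat w)).isEmpty = false := by
                rw [List.concat_eq_append] at h2 ⊢
                exact pvRend_ne_nil _ h2 (by simp)
              rw [List.concat_eq_append] at hne ⊢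
              have hl : pvPairs (ws' ++ [w]) ([] ++ [p]) false = pvRend ((ws' ++ [w]) ++ [[p]]) := by
                simp [pvPairs]
              have hr : pvPairs (ws' ++ [w]) [] true = pvRend (ws' ++ [w]) ++ [((" " : String), (0 : Int))] := by
                simp [pvPairs]
              rw [hl, hr, pvRend_snoc, hne]
              simp
        · have hcur : cur ≠ [] := by simpa [List.isEmpty_iff] using hc
          have hprev : prev = false := by
            cases prev with
            | false => rfl
            | true => exact absurd (h3 rfl) hcur
          subst hprev
          have h5 : pvPairs ws (cur ++ [p]) false = pvRend (ws ++ [cur ++ [p]]) := by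
            simp [pvPairs]
          have h6 : pvPairs ws cur false = pvRend (ws ++ [cur]) := by
            simp [pvPairs, hc]
          rw [h5, h6, pvRend_snoc, pvRend_snoc]
          simp
      have h1' : ∀ q ∈ cur ++ [p], PySem.Str.strIsspace q.1 = false := by
        intro q hq
        rcases List.mem_append.mp hq with h | h
        · exact h1 q h
        · simp at h; subst h; exact hsStr
      have hA : pvAStep (((pvPairs ws cur prev).map (·.1), (pvPairs ws cur prev).map (·.2)), prev) p
          = (((pvPairs ws (cur ++ [p]) false).map (·.1), (pvPairs ws (cur ++ [p]) false).map (·.2)), false) := by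
        rw [hkey]
        simp [pvAStep, hs']
      rw [hA]
      exact ih ws (cur ++ [p]) false h1' h2 (by simp) (fun h _ => absurd h (by simp))

theorem normalize_text_and_styles_py_spec : Claim_equal_normalize_text_and_styles_py := by
  intro chars _
  unfold Spec_normalize_text_and_styles_py normalize_text_and_styles_py normalize_text_and_styles_py_alt
  obtain ⟨prev', hEq, h1, h2, h3, h4⟩ :=
    pvMain chars [] [] false (by simp) (by simp) (fun _ => rfl) (fun _ _ => rfl)
  have hinit : (((pvPairs [] [] false).map (·.1), (pvPairs [] [] false).map (·.2)), false)
      = ((([] : List String), ([] : List Int)), false) := by simp [pvPairs, pvRend]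
  rw [hinit] at hEq
  set S := chars.foldl pvBStep ([], []) with hS
  simp only [hEq]
  by_cases hc : S.2.isEmpty
  · have hc' : S.2 = [] := List.isEmpty_iff.mp hc
    cases hp : prev' with
    | false =>
      have hws : S.1 = [] := h4 hc' hp
      simp [pvPairs, hc', hws, pvRend]
    | true =>
      rcases List.eq_nil_or_concat S.1 with hws | ⟨ws', w, hws⟩
      · simp [pvPairs, hc', hws, pvRend]
      · have hSne : S.1.isEmpty = false := by
          rw [hws]; simp [List.concat_eq_append]
        have hpairs : pvPairs S.1 S.2 true = pvRend S.1 ++ [((" " : String), (0 : Int))] := by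
          simp [pvPairs, hc', hSne]
        rw [hpairs]
        simp [List.map_append, hc]
  · have hc2 : S.2.isEmpty = false := by simpa using hc
    have hcur : S.2 ≠ [] := by simpa [List.isEmpty_iff] using hc
    have hpairs : pvPairs S.1 S.2 prev' = pvRend (S.1 ++ [S.2]) := by
      simp [pvPairs, hc2]
    have hnotrim : ((pvRend (S.1 ++ [S.2])).map (·.1 : String × Int → String)).getLast? ≠ some " " := by
      rw [pvRend_snoc, List.map_append,
        List.getLast?_append_of_ne_nil _ (by simpa using hcur)]
      have hq : S.2.getLast hcur ∈ S.2 := List.getLast_mem hcur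
      have hqs : PySem.Str.strIsspace (S.2.getLast hcur).1 = false := h1 _ hq
      rw [List.getLast?_map, List.getLast?_eq_some_getLast (h := hcur)]
      intro hcontra
      simp only [Option.map_some, Option.some.injEq] at hcontra
      rw [hcontra] at hqs
      exact absurd hqs (by decide)
    rw [hpairs, if_neg hnotrim]
    simp [hc2]
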